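-- pv_equiv track=rewrite | github.com/michezio/CompetitiveCoding | Advent of Code/2024/15/interactive.py | transform_easy_warehouse
-- ===== SOURCE A (Python) =====
-- def transform_easy_warehouse(warehouse):
--
--     nwh = []
--
--     for row in warehouse:
--         nrow = row.replace(".", " ")
--         nrow = nrow.replace("#", "█")
--         nrow = nrow.replace("O", "#")
--         nwh.append([*nrow])
--
--     return nwh
-- ===== SOURCE B (Python) =====
-- def transform_easy_warehouse(warehouse):
--     # Flatten all rows into one string, remap every character in a single
--     # global pass (parallel source/target strings instead of chained
--     # replaces), then re-partition the flat result by the recorded row lengths.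
--     SRC, DST = ".#O", " \u2588#"
--     flat = "".join(warehouse)
--     mapped = []
--     for c in flat:
--         i = SRC.find(c)
--         mapped.append(DST[i] if i >= 0 else c)
--     out = []
--     pos = 0
--     for row in warehouse:
--         out.append(mapped[pos:pos + len(row)])
--         pos += len(row)
--     return out
-- ===== Notes on version B (the rewrite author's own statement) =====
-- stated objective: alternative
-- what changed: Instead of per-row chained string replaces, B concatenates the whole warehouse into one flat string, remaps every character once in a single global pass via parallel source/target lookup strings, and then re-partitions the flat mapped list back into rows by the recorded row lengths.
import Mathlib
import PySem

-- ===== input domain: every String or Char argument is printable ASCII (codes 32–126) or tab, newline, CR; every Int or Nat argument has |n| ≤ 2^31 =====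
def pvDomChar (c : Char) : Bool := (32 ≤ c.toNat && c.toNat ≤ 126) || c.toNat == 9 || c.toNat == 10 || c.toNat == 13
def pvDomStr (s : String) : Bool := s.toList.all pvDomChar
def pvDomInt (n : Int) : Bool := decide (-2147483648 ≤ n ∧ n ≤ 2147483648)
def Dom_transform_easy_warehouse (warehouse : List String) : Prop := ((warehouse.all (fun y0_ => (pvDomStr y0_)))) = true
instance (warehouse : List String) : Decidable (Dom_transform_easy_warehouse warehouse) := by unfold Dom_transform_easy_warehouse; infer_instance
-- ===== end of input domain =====

-- B flattens the whole warehouse into one string, remaps every character in a single global pass (parallel lookup strings), and re-partitions by row lengths — instead of A's per-row chained replaces (alternative; return value only).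

-- ===== PORT A =====
-- A: for each row, three chained replaces, then [*nrow]; rows appended to nwh.
def transform_easy_warehouse (warehouse : List String) : List (List String) :=
  warehouse.foldl
    (fun nwh row =>
      let nrow := PySem.Str.replace row "." " "
      let nrow := PySem.Str.replace nrow "#" "█"
      let nrow := PySem.Str.replace nrow "O" "#"
      nwh ++ [nrow.toList.map (fun c => String.ofList [c])])
    []

-- ===== PORT B =====
-- B: SRC.find(c) / DST[i] lookup of one character (Source B's loop body)
def pvTr (c : Char) : String :=
  let i := PySem.Chars.find ['.', '#', 'O'] [c]
  if 0 ≤ i then String.ofList [(PySem.List.pyGet? [' ', '█', '#'] i).getD c]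
  else String.ofList [c]

def transform_easy_warehouse_alt (warehouse : List String) : List (List String) :=
  let flat := (warehouse.map String.toList).flatten
  let mapped := flat.map pvTr
  (warehouse.foldl
    (fun (st : List (List String) × Int) row =>
      (st.1 ++ [PySem.List.slice mapped (some st.2) (some (st.2 + (row.length : Int)))],
       st.2 + (row.length : Int)))
    ([], 0)).1

-- ===== PRECONDITION & SPEC =====
def Spec_transform_easy_warehouse (warehouse : List String) (out : List (List String)) : Prop := out = transform_easy_warehouse_alt warehouse
instance (warehouse : List String) (out : List (List String)) : Decidable (Spec_transform_easy_warehouse warehouse out) := by unfold Spec_transform_easy_warehouse; infer_instance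

-- ===== CLAIM (what is proved, stated in full; the proofs are below) =====
def Claim_equal_transform_easy_warehouse : Prop := ∀ (warehouse : List String), Dom_transform_easy_warehouse warehouse → Spec_transform_easy_warehouse warehouse (transform_easy_warehouse warehouse)

-- ===== LEMMAS AND PROOFS =====

-- single-char/single-char replace is a per-character map
theorem replace_go_single (o n : Char) :
    ∀ (l : List Char) (fuel : Nat) (acc : List Char), l.length ≤ fuel →
      PySem.Chars.replace.go [o] [n] fuel l acc
        = acc.reverse ++ l.map (fun c => if c = o then n else c) := by
  intro l
  induction l with
  | nil =>
      intro fuel acc _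
      cases fuel <;> simp [PySem.Chars.replace.go]
  | cons c t ih =>
      intro fuel acc h
      cases fuel with
      | zero => simp at h
      | succ m =>
          have h' : t.length ≤ m := Nat.le_of_succ_le_succ (by simpa using h)
          by_cases hco : c = o
          · subst hco
            have hp : List.isPrefixOf [c] (c :: t) = true := by simp [List.isPrefixOf]
            simp only [PySem.Chars.replace.go, hp, if_true, List.length_singleton,
              List.drop_succ_cons, List.drop_zero, ih _ _ h', List.reverse_cons,
              List.map_cons]
            simp
          · have hp : List.isPrefixOf [o] (c :: t) = false := by
              simp [List.isPrefixOf]; exact fun hh => (hco hh.symm).elim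
            simp only [PySem.Chars.replace.go, hp, Bool.false_eq_true, if_false,
              ih _ _ h', List.reverse_cons, List.map_cons, if_neg hco]
            simp

theorem replace_single (o n : Char) (l : List Char) :
    PySem.Chars.replace l [o] [n] = l.map (fun c => if c = o then n else c) := by
  simp [PySem.Chars.replace, replace_go_single o n l l.length [] (le_refl _)]

-- B's lookup agrees with A's chained substitution on every character
theorem pvTr_eq (c : Char) :
    pvTr c = String.ofList
      [if (if (if c = '.' then ' ' else c) = '#' then '█' else (if c = '.' then ' ' else c)) = 'O'
        then '#'
        else (if (if c = '.' then ' ' else c) = '#' then '█' else (if c = '.' then ' ' else c))] := by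
  by_cases h1 : c = '.'
  · subst h1; decide
  · by_cases h2 : c = '#'
    · subst h2; decide
    · by_cases h3 : c = 'O'
      · subst h3; decide
      · have hfind : PySem.Chars.find ['.', '#', 'O'] [c] = -1 := by
          rw [PySem.Chars.find_eq_neg_one_iff]
          intro hin
          have := hin.sublist.subset (List.mem_singleton_self c)
          simp at this
          rcases this with h | h | h <;> simp_all
        simp [pvTr, hfind, if_neg h1, if_neg h2, if_neg h3]

-- each row of A is the per-character map of the chained ifs
theorem rowA_eq (row : String) :
    (PySem.Str.replace (PySem.Str.replace (PySem.Str.replace row "." " ") "#" "█") "O" "#").toList.map (fun c => String.ofList [c])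
      = row.toList.map pvTr := by
  simp only [PySem.Str.replace]
  have hdot : ".".toList = ['.'] := rfl
  have hsp : " ".toList = [' '] := rfl
  have hh : "#".toList = ['#'] := rfl
  have hb : "█".toList = ['█'] := rfl
  have ho : "O".toList = ['O'] := rfl
  simp only [String.toList_ofList, hdot, hsp, hh, hb, ho, replace_single, List.map_map]
  apply List.map_congr_left
  intro c _
  simp only [Function.comp, pvTr_eq c]

-- A's append-fold is a map
theorem foldl_append_map (f : String → List String) :
    ∀ (l : List String) (acc : List (List String)),
      l.foldl (fun nwh row => nwh ++ [f row]) acc = acc ++ l.map f := by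
  intro l
  induction l with
  | nil => simp
  | cons x t ih => intro acc; simp [ih]

-- B's re-partition fold recovers the per-row maps from the flat mapped list
theorem partition_fold (mapped : List String) (g : Char → String) :
    ∀ (ws : List String) (pre : List String) (acc : List (List String)),
      mapped = pre ++ (ws.map (fun r => r.toList.map g)).flatten →
      (ws.foldl
        (fun (st : List (List String) × Int) row =>
          (st.1 ++ [PySem.List.slice mapped (some st.2) (some (st.2 + (row.length : Int)))],
           st.2 + (row.length : Int)))
        (acc, (pre.length : Int))).1
      = acc ++ ws.map (fun r => r.toList.map g) := by
  intro ws
  induction ws with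
  | nil => intro pre acc _; simp
  | cons r t ih =>
      intro pre acc hm
      have hlen : (r.length : Int) = ((r.toList.map g).length : Nat) := by
        simp
      have hslice :
          PySem.List.slice mapped (some (pre.length : Int)) (some ((pre.length : Int) + (r.length : Int)))
            = r.toList.map g := by
        rw [hlen, PySem.List.slice_natCast_add]
        rw [hm]
        simp only [List.map_cons, List.flatten_cons]
        rw [List.drop_left, List.take_left]
      have hpos : (pre.length : Int) + (r.length : Int) = (((pre ++ r.toList.map g).length : Nat) : Int) := by
        simp
      simp only [List.foldl_cons]
      rw [hslice, hpos, ih (pre ++ r.toList.map g) (acc ++ [r.toList.map g])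
            (by rw [hm]; simp [List.append_assoc])]
      simp

-- ===== VERDICT (by name: the statement is the Claim_ definition above) =====
theorem transform_easy_warehouse_spec : Claim_equal_transform_easy_warehouse := by
  intro warehouse _
  show _ = _
  unfold transform_easy_warehouse transform_easy_warehouse_alt
  rw [foldl_append_map]
  simp only [List.nil_append]
  have hflat : ((warehouse.map String.toList).flatten).map pvTr
      = (warehouse.map (fun r => r.toList.map pvTr)).flatten := by
    simp [List.map_flatten, List.map_map, Function.comp_def]
  rw [show ((0 : Int)) = ((([] : List String).length : Nat) : Int) by simp]
  rw [partition_fold _ pvTr warehouse [] [] (by simpa using hflat)]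
  simp only [List.nil_append]
  apply List.map_congr_left
  intro row _
  exact rowA_eq row
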